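-- pv_equiv track=rewrite | github.com/cawp99/N-en-raya-3D | verificaciones.py | verificacion_vertical
-- ===== SOURCE A (Python) =====
-- from typing import List
--
-- def verificacion_vertical(matriz:List[List[int]], columna:int)->bool:
--     """
--     Una función que verifica si una columna en una matriz tiene todas
--     sus entradas iguales.
--
--     ### Argumentos
--     * `matriz`: Una matriz cuadrada de enteros
--     * `columna`: Un índice entero que representa un número de fila
--
--     ### Retorno
--     bool: True si la columna con índice `columna` tiene todas sus entradas iguales.
--     False en caso contrario.
--     """
--
--     if columna not in range(len(matriz)):
--         raise ValueError("El número de fila no es válido")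
--
--
--     comparar = 3 #valor base
--     for i in range(len(matriz)):
--         if matriz[i][columna] != 3:
--             comparar = matriz[i][columna]
--             break
--
--     for i in range(1, len(matriz)):
--         if matriz[i][columna] == 3:
--             pass
--         elif matriz[i][columna] != comparar:
--             return False
--
--     return True #solo si son iguales
-- ===== SOURCE B (Python) =====
-- from typing import List
--
-- def verificacion_vertical(matriz: List[List[int]], columna: int) -> bool:
--     if columna not in range(len(matriz)):
--         raise ValueError("El número de fila no es válido")
--     valores = {matriz[i][columna] for i in range(len(matriz)) if matriz[i][columna] != 3}
--     return len(valores) <= 1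
-- ===== Notes on version B (the rewrite author's own statement) =====
-- stated objective: idiomatic
-- what changed: Instead of fixing a reference value in a first scan and comparing every later entry to it with an early return, B collects the distinct non-3 column values in a set comprehension and checks its cardinality is at most 1.
-- outside the precondition, e.g. on verificacion_vertical([[5], [7], []], 0): A returns False, B raises IndexError
import Mathlib
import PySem

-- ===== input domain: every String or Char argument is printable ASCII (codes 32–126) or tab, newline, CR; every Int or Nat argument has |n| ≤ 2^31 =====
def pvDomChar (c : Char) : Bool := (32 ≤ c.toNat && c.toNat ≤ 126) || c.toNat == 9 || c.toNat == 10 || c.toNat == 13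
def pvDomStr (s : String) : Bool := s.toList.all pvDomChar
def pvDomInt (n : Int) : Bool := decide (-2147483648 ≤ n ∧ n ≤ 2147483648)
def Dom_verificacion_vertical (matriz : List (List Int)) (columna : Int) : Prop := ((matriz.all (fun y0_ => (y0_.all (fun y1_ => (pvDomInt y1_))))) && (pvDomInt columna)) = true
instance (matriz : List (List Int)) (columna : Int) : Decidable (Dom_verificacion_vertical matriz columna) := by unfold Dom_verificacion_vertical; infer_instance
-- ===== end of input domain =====

-- B replaces A's reference-value scan + early-return comparison loop by building the set of
-- distinct non-3 column values and checking its cardinality ≤ 1 (idiomatic; same cost).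


-- matriz[i][columna], total via defaults (only evaluated in-range under Pre_)
def pvCol (matriz : List (List Int)) (columna : Int) (i : Int) : Int :=
  PySem.List.pyGetD (PySem.List.pyGetD matriz i []) columna 0

-- ===== PORT A =====
-- A's first loop: first non-3 entry of the column (default 3)
def vvFind (matriz : List (List Int)) (columna : Int) : List Int → Int
  | [] => 3
  | i :: rest =>
    if pvCol matriz columna i ≠ 3 then pvCol matriz columna i
    else vvFind matriz columna rest

-- A's second loop: early-return comparison against comparar
def vvCheck (matriz : List (List Int)) (columna : Int) (comparar : Int) : List Int → Bool
  | [] => true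
  | i :: rest =>
    if pvCol matriz columna i = 3 then vvCheck matriz columna comparar rest
    else if pvCol matriz columna i ≠ comparar then false
    else vvCheck matriz columna comparar rest

def verificacion_vertical (matriz : List (List Int)) (columna : Int) : Bool :=
  let n : Int := matriz.length
  let comparar := vvFind matriz columna (PySem.List.pyRange 0 n 1)
  vvCheck matriz columna comparar (PySem.List.pyRange 1 n 1)

-- ===== PORT B =====
def verificacion_vertical_alt (matriz : List (List Int)) (columna : Int) : Bool :=
  let n : Int := matriz.length
  let valores : PySem.Set Int :=
    (PySem.List.pyRange 0 n 1).foldl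
      (fun s i => if pvCol matriz columna i ≠ 3 then PySem.Set.add s (pvCol matriz columna i) else s)
      PySem.Set.empty
  decide (PySem.Set.len valores ≤ 1)

-- ===== PRECONDITION & SPEC =====
-- Pre_ excludes the inputs where the Python raises: columna outside range(len(matriz))
-- (ValueError), and ragged matrices with a row shorter than columna+1 (IndexError in A's scan
-- or in B's comprehension; on a few such inputs A still returns False via its early return,
-- but B naturally raises IndexError there — see the cite in claim.json).
def Pre_verificacion_vertical (matriz : List (List Int)) (columna : Int) : Prop :=
  0 ≤ columna ∧ columna < matriz.length ∧ ∀ row ∈ matriz, columna < (row.length : Int)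
instance (matriz : List (List Int)) (columna : Int) : Decidable (Pre_verificacion_vertical matriz columna) := by unfold Pre_verificacion_vertical; infer_instance

def pvWitness_verificacion_vertical : List (List Int) × Int := ([[5, 3], [3, 2], [5, 9]], 0)

def Spec_verificacion_vertical (matriz : List (List Int)) (columna : Int) (out : Bool) : Prop := out = verificacion_vertical_alt matriz columna
instance (matriz : List (List Int)) (columna : Int) (out : Bool) : Decidable (Spec_verificacion_vertical matriz columna out) := by unfold Spec_verificacion_vertical; infer_instance

-- ===== CLAIM (what is proved, stated in full; the proofs are below) =====
def Claim_equal_verificacion_vertical : Prop := ∀ (matriz : List (List Int)) (columna : Int), Dom_verificacion_vertical matriz columna → Pre_verificacion_vertical matriz columna → Spec_verificacion_vertical matriz columna (verificacion_vertical matriz columna)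

-- ===== LEMMAS AND PROOFS =====

-- the non-3 column values along an index list
def vvVals (matriz : List (List Int)) (columna : Int) (l : List Int) : List Int :=
  (l.map (pvCol matriz columna)).filter (· ≠ 3)

lemma vvVals_cons (matriz : List (List Int)) (columna : Int) (i : Int) (rest : List Int) :
    vvVals matriz columna (i :: rest)
      = if pvCol matriz columna i = 3 then vvVals matriz columna rest
        else pvCol matriz columna i :: vvVals matriz columna rest := by
  by_cases h : pvCol matriz columna i = 3 <;> simp [vvVals, h]

lemma vvFind_eq_headD (matriz : List (List Int)) (columna : Int) (l : List Int) :
    vvFind matriz columna l = (vvVals matriz columna l).headD 3 := by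
  induction l with
  | nil => rfl
  | cons i rest ih =>
    rw [vvFind, vvVals_cons]
    by_cases h : pvCol matriz columna i = 3 <;> simp [h, ih]

lemma vvCheck_eq_all (matriz : List (List Int)) (columna : Int) (c : Int) (l : List Int) :
    vvCheck matriz columna c l = (vvVals matriz columna l).all (· = c) := by
  induction l with
  | nil => rfl
  | cons i rest ih =>
    rw [vvCheck, vvVals_cons]
    by_cases h : pvCol matriz columna i = 3
    · simp [h, ih]
    · by_cases h2 : pvCol matriz columna i = c
      · have hc3 : ¬ c = 3 := h2 ▸ h
        simp [h2, hc3, ih]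
      · simp [h, h2]

lemma vvFold_eq_update (matriz : List (List Int)) (columna : Int) (l : List Int)
    (s : PySem.Set Int) :
    l.foldl (fun s i => if pvCol matriz columna i ≠ 3 then PySem.Set.add s (pvCol matriz columna i) else s) s
      = PySem.Set.update s (vvVals matriz columna l) := by
  induction l generalizing s with
  | nil => rfl
  | cons i rest ih =>
    rw [List.foldl_cons, ih, vvVals_cons]
    by_cases h : pvCol matriz columna i = 3 <;>
      simp [h, PySem.Set.update, List.foldl_cons]

-- a set built from values all equal to v, starting from {v}, stays {v}
lemma update_singleton_of_all (v : Int) (t : List Int) (h : t.all (· = v)) :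
    PySem.Set.update [v] t = [v] := by
  induction t with
  | nil => rfl
  | cons x rest ih =>
    simp only [List.all_cons, Bool.and_eq_true, decide_eq_true_eq] at h
    simpa [PySem.Set.update, List.foldl_cons, PySem.Set.add, h.1] using ih h.2

-- two members of a list of length ≤ 1 coincide
lemma eq_of_mem_of_length_le_one {α : Type} (l : List α) (hl : l.length ≤ 1)
    {a b : α} (ha : a ∈ l) (hb : b ∈ l) : a = b := by
  match l with
  | [] => cases ha
  | [c] =>
    rw [List.mem_singleton] at ha hb
    rw [ha, hb]
  | c :: d :: r => simp at hl

-- cardinality of set(v::t) ≤ 1 iff every element of t equals v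
lemma len_ofList_cons_le_one_iff (v : Int) (t : List Int) :
    (PySem.Set.len (PySem.Set.ofList (v :: t)) ≤ 1) ↔ t.all (· = v) = true := by
  constructor
  · intro h
    rw [List.all_eq_true]
    intro x hx
    rw [decide_eq_true_eq]
    have hv : v ∈ PySem.Set.ofList (v :: t) := by
      rw [PySem.Set.mem_ofList]; exact List.mem_cons_self
    have hxmem : x ∈ PySem.Set.ofList (v :: t) := by
      rw [PySem.Set.mem_ofList]; exact List.mem_cons_of_mem _ hx
    have hlen : (PySem.Set.ofList (v :: t)).length ≤ 1 := by
      simpa [PySem.Set.len] using h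
    exact eq_of_mem_of_length_le_one _ hlen hxmem hv
  · intro h
    have hone : PySem.Set.ofList (v :: t) = [v] := by
      have h1 : PySem.Set.ofList (v :: t) = PySem.Set.update (PySem.Set.add PySem.Set.empty v) t := by
        simp [PySem.Set.ofList_eq_foldl, PySem.Set.update, List.foldl_cons]
      have hadd : PySem.Set.add PySem.Set.empty v = [v] := rfl
      rw [h1, hadd, update_singleton_of_all v t h]
    simp [hone, PySem.Set.len]

-- B's port in terms of vvVals of the full index range
lemma alt_eq (matriz : List (List Int)) (columna : Int) :
    verificacion_vertical_alt matriz columna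
      = decide (PySem.Set.len (PySem.Set.ofList (vvVals matriz columna (PySem.List.pyRange 0 matriz.length 1))) ≤ 1) := by
  simp only [verificacion_vertical_alt, vvFold_eq_update]
  congr 1

-- ===== VERDICT (by name: the statement is the Claim_ definition above) =====
theorem verificacion_vertical_spec : Claim_equal_verificacion_vertical := by
  intro matriz columna _ hpre
  unfold Spec_verificacion_vertical
  obtain ⟨h0, hn, -⟩ := hpre
  have hn1 : (0 : Int) < matriz.length := lt_of_le_of_lt h0 hn
  have hr : PySem.List.pyRange 0 (matriz.length : Int) 1
      = 0 :: PySem.List.pyRange 1 (matriz.length : Int) 1 := by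
    rw [PySem.List.pyRange_one_cons hn1]; norm_num
  rw [alt_eq]
  simp only [verificacion_vertical]
  rw [hr, vvCheck_eq_all, vvFind_eq_headD, vvVals_cons]
  by_cases h0c : pvCol matriz columna 0 = 3
  · -- row 0 contributes nothing: the values are those of rows 1..n-1
    rw [if_pos h0c]
    cases hw : vvVals matriz columna (PySem.List.pyRange 1 (matriz.length : Int) 1) with
    | nil => simp [PySem.Set.ofList, PySem.Set.len]
    | cons v t =>
      simp only [len_ofList_cons_le_one_iff]
      rw [Bool.eq_iff_iff, List.all_eq_true, decide_eq_true_eq]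
      simp [List.all_eq_true]
  · -- row 0 contributes its value, which is exactly comparar
    rw [if_neg h0c]
    simp only [len_ofList_cons_le_one_iff]
    rw [Bool.eq_iff_iff, List.all_eq_true, decide_eq_true_eq]
    simp
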